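-- pv_equiv track=rewrite | github.com/Hanae8B/CCB | utils.py | contains_emphasis
-- ===== SOURCE A (Python) =====
-- def contains_emphasis(text: str) -> bool:
--     """
--     Detect emphasis markers (exclamation marks, ALL CAPS words).
--     """
--     if not text:
--         return False
--     if "!" in text:
--         return True
--     if any(word.isupper() and len(word) > 2 for word in text.split()):
--         return True
--     return False
-- ===== SOURCE B (Python) =====
-- def contains_emphasis(text: str) -> bool:
--     """
--     Detect emphasis markers (exclamation marks, ALL CAPS words).
--
--     Character-level state machine: a single pass over the characters,
--     tracking the current word's length and case profile; no split(),
--     no intermediate word list.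
--     """
--     length = 0
--     has_upper = False
--     has_lower = False
--     for c in text:
--         if c == '!':
--             return True
--         if c.isspace():
--             if has_upper and not has_lower and length > 2:
--                 return True
--             length = 0
--             has_upper = False
--             has_lower = False
--         else:
--             length += 1
--             if c.isupper():
--                 has_upper = True
--             elif c.islower():
--                 has_lower = True
--     return has_upper and not has_lower and length > 2
-- ===== Notes on version B (the rewrite author's own statement) =====
-- stated objective: alternative
-- what changed: Replaces A's staged passes (whole-string exclamation-mark membership test, then split() building a word list that a second scan checks for ALL-CAPS words) with a single character-level state machine that never materialises words: one pass tracking the current word's length and case profile, returning early on an exclamation mark or at a word boundary that closes an ALL-CAPS word.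
import Mathlib
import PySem

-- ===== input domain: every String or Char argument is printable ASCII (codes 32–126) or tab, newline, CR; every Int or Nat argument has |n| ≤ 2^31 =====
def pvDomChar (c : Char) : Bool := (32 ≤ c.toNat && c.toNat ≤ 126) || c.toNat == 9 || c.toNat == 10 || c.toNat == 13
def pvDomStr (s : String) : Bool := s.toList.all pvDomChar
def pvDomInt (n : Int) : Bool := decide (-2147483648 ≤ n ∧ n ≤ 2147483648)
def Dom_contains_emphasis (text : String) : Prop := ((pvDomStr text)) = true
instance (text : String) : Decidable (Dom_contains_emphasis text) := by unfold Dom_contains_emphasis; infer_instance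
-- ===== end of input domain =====

-- B replaces A's staged passes (whole-string exclamation-mark test, then a split()-built word list scanned for ALL-CAPS) with a single character-level state machine that never materialises words (alternative algorithm, same result).


-- Python str.isupper(): at least one cased character and no lowercase one.
-- Hand port, exact on the printable-ASCII domain (where the cased characters are A-Z and a-z).
def pyStrIsupper (cs : List Char) : Bool :=
  cs.any PySem.Chars.isupper && cs.all (fun c => !PySem.Chars.islower c)

-- ===== PORT A =====
def contains_emphasis (text : String) : Bool :=
  if text.toList.isEmpty then false
  else if PySem.Chars.isIn ['!'] text.toList then true
  else if (PySem.Chars.split₀ text.toList).any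
      (fun w => pyStrIsupper w && decide (w.length > 2)) then true
  else false

-- ===== PORT B =====
-- the for-loop of Source B: state (length, has_upper, has_lower); per-char isupper/islower
-- are exact on the ASCII domain (PySem.Chars.isupper/islower)
def altGo : List Char → Nat → Bool → Bool → Bool
  | [], length, hasU, hasL => hasU && !hasL && decide (length > 2)
  | c :: rest, length, hasU, hasL =>
    if c = '!' then true
    else if PySem.Chars.isspace c then
      if hasU && !hasL && decide (length > 2) then true
      else altGo rest 0 false false
    else
      altGo rest (length + 1)
        (if PySem.Chars.isupper c then true else hasU)
        (if PySem.Chars.isupper c then hasL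
         else if PySem.Chars.islower c then true else hasL)

def contains_emphasis_alt (text : String) : Bool :=
  altGo text.toList 0 false false

-- ===== PRECONDITION & SPEC =====
def Spec_contains_emphasis (text : String) (out : Bool) : Prop := out = contains_emphasis_alt text
instance (text : String) (out : Bool) : Decidable (Spec_contains_emphasis text out) := by unfold Spec_contains_emphasis; infer_instance

-- ===== CLAIM (what is proved, stated in full; the proofs are below) =====
def Claim_equal_contains_emphasis : Prop := ∀ (text : String), Dom_contains_emphasis text → Spec_contains_emphasis text (contains_emphasis text)

-- ===== LEMMAS AND PROOFS =====

-- a one-character substring test is membership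
lemma isIn_singleton_iff (c : Char) (l : List Char) :
    PySem.Chars.isIn [c] l = true ↔ c ∈ l := by
  rw [PySem.Chars.isIn_iff_infix]
  constructor
  · intro h; exact h.mem (List.mem_singleton_self c)
  · intro h
    obtain ⟨a, b, rfl⟩ := List.append_of_mem h
    exact ⟨a, b, by simp⟩

lemma upper_not_lower (c : Char) :
    PySem.Chars.isupper c = true → PySem.Chars.islower c = false := by
  intro h
  rw [PySem.Chars.isupper, Bool.and_eq_true, decide_eq_true_eq, decide_eq_true_eq] at h
  rw [PySem.Chars.islower]
  have hna : ¬ ('a' ≤ c) := fun hle => absurd (le_trans hle h.2) (by decide)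
  simp [hna]

lemma all_not_eq_not_any (p : Char → Bool) (l : List Char) :
    l.all (fun c => !p c) = !l.any p := by
  induction l with
  | nil => rfl
  | cons a t ih => simp [ih]

-- the per-word predicate A's scan checks
def predW (w : List Char) : Bool := pyStrIsupper w && decide (w.length > 2)

lemma predW_reverse (cur : List Char) :
    predW cur.reverse =
      (cur.any PySem.Chars.isupper && !cur.any PySem.Chars.islower && decide (cur.length > 2)) := by
  simp [predW, pyStrIsupper, all_not_eq_not_any, Bool.and_assoc]

-- main invariant: B's state machine, run with the abstracted state of the current
-- word cur, computes exactly "there is a '!' left or some produced word satisfies predW"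
lemma main_inv : ∀ (s cur : List Char) (acc : List (List Char)), '!' ∉ cur →
    (decide ('!' ∈ s) || (PySem.Chars.split₀.go s cur acc).any predW) =
    (acc.any predW ||
      altGo s cur.length (cur.any PySem.Chars.isupper) (cur.any PySem.Chars.islower)) := by
  intro s
  induction s with
  | nil =>
    intro cur acc hcur
    by_cases h : cur.isEmpty = true
    · have : cur = [] := List.isEmpty_iff.mp h
      subst this
      simp [PySem.Chars.split₀.go, altGo]
    · have h' : cur.isEmpty = false := Bool.eq_false_iff.mpr h
      simp only [PySem.Chars.split₀.go, h', Bool.false_eq_true, if_false, altGo,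
        List.mem_nil_iff, decide_false, Bool.false_or, List.any_reverse, List.any_cons]
      rw [predW_reverse]
      cases acc.any predW <;>
        cases cur.any PySem.Chars.isupper <;>
        cases cur.any PySem.Chars.islower <;> simp
  | cons c rest ih =>
    intro cur acc hcur
    by_cases hbang : c = '!'
    · subst hbang
      simp [PySem.Chars.split₀.go, altGo, PySem.Chars.isspace]
    · have hdec : decide ('!' ∈ c :: rest) = decide ('!' ∈ rest) := by
        simp [List.mem_cons, Ne.symm hbang]
      by_cases hsp : PySem.Chars.isspace c = true
      · by_cases h : cur.isEmpty = true
        · have : cur = [] := List.isEmpty_iff.mp h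
          subst this
          simp only [PySem.Chars.split₀.go, hsp, if_true, List.isEmpty_nil, altGo, hbang,
            if_false, hdec, List.length_nil, List.any_nil]
          simpa using ih [] acc (by simp)
        · have h' : cur.isEmpty = false := Bool.eq_false_iff.mpr h
          simp only [PySem.Chars.split₀.go, hsp, if_true, h', Bool.false_eq_true, if_false,
            altGo, hbang]
          rw [hdec, ih [] (cur.reverse :: acc) (by simp)]
          simp only [List.any_cons, List.length_nil, List.any_nil]
          rw [predW_reverse]
          cases acc.any predW <;>
            cases cur.any PySem.Chars.isupper <;>
            cases cur.any PySem.Chars.islower <;>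
            by_cases hl : decide (cur.length > 2) = true <;>
            simp_all
      · have hsp' : PySem.Chars.isspace c = false := Bool.eq_false_iff.mpr hsp
        simp only [PySem.Chars.split₀.go, hsp', Bool.false_eq_true, if_false, altGo, hbang,
          if_false]
        have hU : ((c :: cur).any PySem.Chars.isupper) =
            (if PySem.Chars.isupper c then true else cur.any PySem.Chars.isupper) := by
          cases hu : PySem.Chars.isupper c <;> simp [hu]
        have hL : ((c :: cur).any PySem.Chars.islower) =
            (if PySem.Chars.isupper c then cur.any PySem.Chars.islower
             else if PySem.Chars.islower c then true else cur.any PySem.Chars.islower) := by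
          cases hu : PySem.Chars.isupper c
          · cases hl : PySem.Chars.islower c <;> simp [hl]
          · simp [upper_not_lower c hu]
        rw [hdec, ih (c :: cur) acc (by simp [hcur, Ne.symm hbang]), List.length_cons, hU, hL]

-- A's value equals "'!' somewhere or some word is ALL CAPS and long"
lemma contains_emphasis_eq (text : String) :
    contains_emphasis text =
      (decide ('!' ∈ text.toList) || (PySem.Chars.split₀ text.toList).any predW) := by
  unfold contains_emphasis
  by_cases he : text.toList.isEmpty = true
  · have : text.toList = [] := List.isEmpty_iff.mp he
    simp [this, PySem.Chars.split₀, PySem.Chars.split₀.go]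
  · simp only [Bool.eq_false_iff.mpr he, Bool.false_eq_true, if_false]
    by_cases hb : PySem.Chars.isIn ['!'] text.toList = true
    · simp [hb, (isIn_singleton_iff '!' text.toList).mp hb]
    · have hb' : PySem.Chars.isIn ['!'] text.toList = false := Bool.eq_false_iff.mpr hb
      have hnot : '!' ∉ text.toList := fun h => hb ((isIn_singleton_iff '!' text.toList).mpr h)
      simp only [hb', Bool.false_eq_true, if_false, hnot, decide_false, Bool.false_or]
      have hf : (fun w => pyStrIsupper w && decide (w.length > 2)) = predW := rfl
      rw [hf]
      cases h : (PySem.Chars.split₀ text.toList).any predW <;> simp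

-- ===== VERDICT (by name: the statement is the Claim_ definition above) =====
theorem contains_emphasis_spec : Claim_equal_contains_emphasis := by
  intro text _
  unfold Spec_contains_emphasis contains_emphasis_alt
  rw [contains_emphasis_eq]
  have := main_inv text.toList [] [] (by simp)
  simpa [PySem.Chars.split₀] using this
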